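-- pv_equiv track=rewrite | github.com/gio471/GOA_HM | day 72/classwork/classwork.py | string_transformer
-- ===== SOURCE A (Python) =====
-- def string_transformer(s):
--     swapped = s.swapcase()
--     parts = []
--     temp = ""
--     for char in swapped:
--         if char == " ":
--             if temp:
--                 parts.append(temp)
--                 temp = ""
--             parts.append(" ")
--         else:
--             temp += char
--     if temp:
--         parts.append(temp)
--     parts.reverse()
--     return "".join(parts)
-- ===== SOURCE B (Python) =====
-- def string_transformer(s):
--     # Reverse the whole swapcased string, then un-reverse each maximal run of
--     # non-space characters while scanning once with an index.
--     rev = s.swapcase()[::-1]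
--     out = []
--     i, n = 0, len(rev)
--     while i < n:
--         if rev[i] == " ":
--             out.append(" ")
--             i += 1
--         else:
--             j = i
--             while j < n and rev[j] != " ":
--                 j += 1
--             out.append(rev[i:j][::-1])
--             i = j
--     return "".join(out)
-- ===== Notes on version B (the rewrite author's own statement) =====
-- stated objective: alternative
-- what changed: Instead of accumulating a word/space token list, reversing it and joining, B reverses the whole swapcased string once and then scans it with an index, re-reversing each maximal run of non-space characters in place.
import Mathlib
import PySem

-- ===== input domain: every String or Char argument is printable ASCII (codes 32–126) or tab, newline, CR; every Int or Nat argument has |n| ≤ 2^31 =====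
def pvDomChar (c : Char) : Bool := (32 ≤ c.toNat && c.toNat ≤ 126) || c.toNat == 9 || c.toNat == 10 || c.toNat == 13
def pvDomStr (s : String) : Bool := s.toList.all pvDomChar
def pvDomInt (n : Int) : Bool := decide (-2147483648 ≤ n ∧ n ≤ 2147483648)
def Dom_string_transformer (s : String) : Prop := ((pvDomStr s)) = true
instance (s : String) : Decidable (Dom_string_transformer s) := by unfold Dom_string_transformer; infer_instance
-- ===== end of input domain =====

-- B swapcases, reverses the WHOLE string once, then re-reverses each maximal run of
-- non-space characters while scanning it once — no token list is built (objective: alternative).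

-- ===== PORT A =====
-- s.swapcase(), per ASCII character (Dom_ restricts input to ASCII, where this is exact)
def pvSwapChar (c : Char) : Char :=
  if c.isLower then c.toUpper else if c.isUpper then c.toLower else c

-- one iteration of A's for-loop: state = (parts, temp)
def pvStepA (st : List (List Char) × List Char) (c : Char) : List (List Char) × List Char :=
  if c = ' ' then
    ((if st.2 = [] then st.1 else st.1 ++ [st.2]) ++ [[' ']], [])
  else (st.1, st.2 ++ [c])

def string_transformer (s : String) : String :=
  let swapped := s.toList.map pvSwapChar
  let st := swapped.foldl pvStepA ([], [])
  let parts := if st.2 = [] then st.1 else st.1 ++ [st.2]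
  String.ofList parts.reverse.flatten

-- ===== PORT B =====
-- B's outer while-loop, consuming the reversed string from the front: a space is
-- copied, a maximal non-space run (the inner scan j) is emitted reversed.
def pvRuns : List Char → List Char
  | [] => []
  | c :: cs =>
    if c = ' ' then ' ' :: pvRuns cs
    else ((c :: cs).takeWhile (· ≠ ' ')).reverse ++ pvRuns ((c :: cs).dropWhile (· ≠ ' '))
  termination_by cs => cs.length
  decreasing_by
    · simp
    · simp only [List.dropWhile, *]
      simp [*]
      exact List.length_dropWhile_le _ _

def string_transformer_alt (s : String) : String :=
  let rev := (s.toList.map pvSwapChar).reverse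
  String.ofList (pvRuns rev)

-- ===== PRECONDITION & SPEC =====
def Spec_string_transformer (s : String) (out : String) : Prop := out = string_transformer_alt s
instance (s : String) (out : String) : Decidable (Spec_string_transformer s out) := by unfold Spec_string_transformer; infer_instance

-- ===== CLAIM (what is proved, stated in full; the proofs are below) =====
def Claim_equal_string_transformer : Prop := ∀ (s : String), Dom_string_transformer s → Spec_string_transformer s (string_transformer s)

-- ===== LEMMAS AND PROOFS =====

-- reference: A's output for remaining input cs with pending word t, as one recursion
def pvR : List Char → List Char → List Char
  | t, [] => t
  | t, c :: cs => if c = ' ' then pvR [] cs ++ ' ' :: t else pvR (t ++ [c]) cs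

lemma pvA_gen (cs : List Char) : ∀ (p : List (List Char)) (t : List Char),
    (if (cs.foldl pvStepA (p, t)).2 = [] then (cs.foldl pvStepA (p, t)).1
     else (cs.foldl pvStepA (p, t)).1 ++ [(cs.foldl pvStepA (p, t)).2]).reverse.flatten
      = pvR t cs ++ p.reverse.flatten := by
  induction cs with
  | nil =>
      intro p t
      by_cases ht : t = [] <;> simp [pvR, ht]
  | cons c cs ih =>
      intro p t
      rw [List.foldl_cons]
      by_cases hc : c = ' '
      · subst hc
        rw [show pvStepA (p, t) ' ' = ((if t = [] then p else p ++ [t]) ++ [[' ']], []) from by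
          simp [pvStepA]]
        rw [ih]
        by_cases ht : t = [] <;> simp [pvR, ht]
      · rw [show pvStepA (p, t) c = (p, t ++ [c]) from by simp [pvStepA, hc]]
        rw [ih]
        simp [pvR, hc]

lemma pvR_nonspace (ys : List Char) : ∀ t, (∀ y ∈ ys, y ≠ ' ') → pvR t ys = t ++ ys := by
  induction ys with
  | nil => intro t _; simp [pvR]
  | cons y ys ih =>
      intro t h
      have hy := h y (by simp)
      rw [show pvR t (y :: ys) = pvR (t ++ [y]) ys from by simp [pvR, hy]]
      rw [ih _ (fun z hz => h z (by simp [hz]))]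
      simp

lemma pvR_space_end (xs : List Char) : ∀ t, pvR t (xs ++ [' ']) = ' ' :: pvR t xs := by
  induction xs with
  | nil => intro t; simp [pvR]
  | cons a xs ih =>
      intro t
      by_cases ha : a = ' '
      · subst ha
        simp only [List.cons_append]
        rw [show pvR t (' ' :: (xs ++ [' '])) = pvR [] (xs ++ [' ']) ++ ' ' :: t from by
          simp [pvR]]
        rw [ih]
        simp [pvR]
      · simp only [List.cons_append]
        rw [show pvR t (a :: (xs ++ [' '])) = pvR (t ++ [a]) (xs ++ [' ']) from by
          simp [pvR, ha]]
        rw [ih]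
        simp [pvR, ha]

lemma pvR_pull_word (ys : List Char) (hys : ∀ y ∈ ys, y ≠ ' ') :
    ∀ (xs : List Char) (t : List Char),
      pvR t (xs ++ ' ' :: ys) = ys ++ pvR t (xs ++ [' ']) := by
  intro xs
  induction xs with
  | nil =>
      intro t
      simp only [List.nil_append]
      rw [show pvR t (' ' :: ys) = pvR [] ys ++ ' ' :: t from by simp [pvR]]
      rw [pvR_nonspace ys [] hys]
      simp [pvR]
  | cons a xs ih =>
      intro t
      by_cases ha : a = ' '
      · subst ha
        simp only [List.cons_append]
        rw [show pvR t (' ' :: (xs ++ ' ' :: ys)) = pvR [] (xs ++ ' ' :: ys) ++ ' ' :: t from by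
          simp [pvR]]
        rw [ih []]
        rw [show pvR t (' ' :: (xs ++ [' '])) = pvR [] (xs ++ [' ']) ++ ' ' :: t from by
          simp [pvR]]
        simp
      · simp only [List.cons_append]
        rw [show pvR t (a :: (xs ++ ' ' :: ys)) = pvR (t ++ [a]) (xs ++ ' ' :: ys) from by
          simp [pvR, ha]]
        rw [ih (t ++ [a])]
        rw [show pvR t (a :: (xs ++ [' '])) = pvR (t ++ [a]) (xs ++ [' ']) from by
          simp [pvR, ha]]

lemma pvRuns_eq_pvR_aux (n : Nat) : ∀ r : List Char, r.length ≤ n → pvRuns r = pvR [] r.reverse := by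
  induction n with
  | zero =>
      intro r hr
      have : r = [] := by cases r <;> simp_all
      subst this
      simp [pvRuns, pvR]
  | succ n ih =>
      intro r hr
      match r with
      | [] => simp [pvRuns, pvR]
      | c :: cs =>
        by_cases hc : c = ' '
        · subst hc
          rw [show pvRuns (' ' :: cs) = ' ' :: pvRuns cs from by rw [pvRuns]; simp]
          rw [ih cs (by simpa using hr)]
          simp only [List.reverse_cons]
          rw [pvR_space_end]
        · rw [show pvRuns (c :: cs) =
              ((c :: cs).takeWhile (· ≠ ' ')).reverse ++ pvRuns ((c :: cs).dropWhile (· ≠ ' '))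
            from by rw [pvRuns]; simp [hc]]
          have hwns : ∀ y ∈ ((c :: cs).takeWhile (· ≠ ' ')).reverse, y ≠ ' ' := by
            intro y hy
            have := List.mem_takeWhile_imp (p := (· ≠ ' ')) (l := c :: cs) (List.mem_reverse.mp hy)
            simpa using this
          have hdlen : ((c :: cs).dropWhile (· ≠ ' ')).length ≤ n := by
            have h1 : (c :: cs).dropWhile (· ≠ ' ') = cs.dropWhile (· ≠ ' ') := by
              simp [List.dropWhile, hc]
            rw [h1]
            exact le_trans (List.length_dropWhile_le _ _) (by simpa using hr)
          rw [ih _ hdlen]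
          have hsplit : (c :: cs).reverse
              = ((c :: cs).dropWhile (· ≠ ' ')).reverse ++ ((c :: cs).takeWhile (· ≠ ' ')).reverse := by
            rw [← List.reverse_append, List.takeWhile_append_dropWhile]
          rw [hsplit]
          match hde : (c :: cs).dropWhile (· ≠ ' ') with
          | [] =>
              have hns := pvR_nonspace _ [] hwns
              simp only [ne_eq, decide_not] at hns ⊢
              simp [hns, pvR]
          | e :: d' =>
              have he : e = ' ' := by
                have h2 := List.head?_dropWhile_not (p := (· ≠ ' ')) (l := c :: cs)
                rw [hde] at h2
                simpa using h2
              subst he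
              simp only [List.reverse_cons, List.append_assoc, List.singleton_append]
              rw [pvR_pull_word _ hwns d'.reverse []]

lemma pvRuns_eq_pvR (r : List Char) : pvRuns r = pvR [] r.reverse :=
  pvRuns_eq_pvR_aux r.length r le_rfl

-- ===== VERDICT (by name: the statement is the Claim_ definition above) =====
theorem string_transformer_spec : Claim_equal_string_transformer := by
  intro s _
  unfold Spec_string_transformer string_transformer string_transformer_alt
  have hA := pvA_gen (s.toList.map pvSwapChar) [] []
  simp only [List.reverse_nil, List.flatten_nil, List.append_nil] at hA
  simp only [pvRuns_eq_pvR, List.reverse_reverse]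
  simp [hA]
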